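-- pv_equiv track=rewrite | github.com/shivamkrishna1000/fyllo-alert-service | app/alert_processor.py | build_rules_by_trigger
-- ===== SOURCE A (Python) =====
-- from typing import Any, Dict, List, TypedDict
--
-- class Rule(TypedDict):
--     trigger: str
--     condition: str
--     message: str
--
-- def build_rules_by_trigger(rule_table: List[Rule]) -> Dict[str, List[Rule]]:
--     """
--     Organize rules by trigger type.
--
--     Parameters
--     ----------
--     rule_table : List[Rule]
--         List of rule definitions.
--
--     Returns
--     -------
--     Dict[str, List[Rule]]
--         Mapping of trigger → list of rules.
--     """
--     rules_by_trigger: Dict[str, List[Rule]] = {}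
--
--     for rule in rule_table:
--         trigger = rule["trigger"]
--
--         if trigger not in rules_by_trigger:
--             rules_by_trigger[trigger] = []
--
--         rules_by_trigger[trigger].append(rule)
--
--     return rules_by_trigger
-- ===== SOURCE B (Python) =====
-- def build_rules_by_trigger(rule_table):
--     """Organize rules by trigger type (two-pass: distinct triggers, then filter)."""
--     triggers = list(dict.fromkeys(rule["trigger"] for rule in rule_table))
--     return {t: [rule for rule in rule_table if rule["trigger"] == t] for t in triggers}
-- ===== Notes on version B (the rewrite author's own statement) =====
-- stated objective: idiomatic
-- what changed: Replaces A's single pass maintaining a mutable dict (membership test, empty-list insertion, append) by a two-pass dict comprehension: collect the distinct triggers in first-occurrence order with dict.fromkeys, then build each group with a filter over the whole table.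
import Mathlib
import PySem

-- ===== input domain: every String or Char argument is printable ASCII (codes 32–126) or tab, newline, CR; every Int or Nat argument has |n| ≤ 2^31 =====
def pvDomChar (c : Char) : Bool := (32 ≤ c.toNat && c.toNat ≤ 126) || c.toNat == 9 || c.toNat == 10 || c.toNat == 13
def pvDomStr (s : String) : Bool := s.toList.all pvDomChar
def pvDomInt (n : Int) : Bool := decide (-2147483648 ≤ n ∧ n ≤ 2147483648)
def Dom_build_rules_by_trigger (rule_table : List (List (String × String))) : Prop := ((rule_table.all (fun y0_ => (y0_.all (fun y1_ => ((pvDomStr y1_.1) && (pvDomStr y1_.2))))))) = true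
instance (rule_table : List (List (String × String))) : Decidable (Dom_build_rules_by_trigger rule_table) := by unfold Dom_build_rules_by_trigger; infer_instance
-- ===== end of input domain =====

-- B groups by a two-pass dict comprehension (distinct triggers, then a filter per trigger)
-- instead of A's single pass over a mutable dict; return values are equal on Pre_.

-- rule["trigger"] — a rule is a Python dict (duplicate keys collapse, last wins, as in dict(...))
def pvTrig (r : List (String × String)) : String :=
  PySem.Dict.getD (PySem.Dict.ofList r) "trigger" ""

-- ===== PORT A =====
def build_rules_by_trigger (rule_table : List (List (String × String))) : List (String × List (List (String × String))) :=
  (rule_table.foldl (fun d rule =>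
      let trigger := pvTrig rule
      let d := if d.contains trigger then d else d.insert trigger []
      d.modify trigger [] (fun l => l ++ [rule]))
    PySem.Dict.empty).items

-- ===== PORT B =====
def build_rules_by_trigger_alt (rule_table : List (List (String × String))) : List (String × List (List (String × String))) :=
  let triggers := PySem.List.dedup (rule_table.map pvTrig)
  (triggers.foldl (fun d t => d.insert t (rule_table.filter (fun r => pvTrig r == t)))
    PySem.Dict.empty).items

-- ===== PRECONDITION & SPEC =====
-- Pre_ excludes rules missing the "trigger" key, on which Python A raises KeyError.
def Pre_build_rules_by_trigger (rule_table : List (List (String × String))) : Prop :=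
  rule_table.all (fun r => (PySem.Dict.ofList r).contains "trigger") = true
instance (rule_table : List (List (String × String))) : Decidable (Pre_build_rules_by_trigger rule_table) := by unfold Pre_build_rules_by_trigger; infer_instance
def pvWitness_build_rules_by_trigger : (List (List (String × String))) :=
  [[("trigger", "rain"), ("condition", "x>1"), ("message", "hi")],
   [("trigger", "wind"), ("condition", "y<2"), ("message", "ho")],
   [("trigger", "rain"), ("condition", "z=0"), ("message", "he")]]

def Spec_build_rules_by_trigger (rule_table : List (List (String × String))) (out : List (String × List (List (String × String)))) : Prop := out = build_rules_by_trigger_alt rule_table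
instance (rule_table : List (List (String × String))) (out : List (String × List (List (String × String)))) : Decidable (Spec_build_rules_by_trigger rule_table out) := by unfold Spec_build_rules_by_trigger; infer_instance

-- ===== CLAIM (what is proved, stated in full; the proofs are below) =====
def Claim_equal_build_rules_by_trigger : Prop := ∀ (rule_table : List (List (String × String))), Dom_build_rules_by_trigger rule_table → Pre_build_rules_by_trigger rule_table → Spec_build_rules_by_trigger rule_table (build_rules_by_trigger rule_table)

-- ===== LEMMAS AND PROOFS =====

-- A's loop body (test + insert [] + append) is one Dict.modify step
theorem pvStepA_eq (d : PySem.Dict String (List (List (String × String)))) (rule : List (String × String)) :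
    (let trigger := pvTrig rule
     let d := if d.contains trigger then d else d.insert trigger []
     d.modify trigger [] (fun l => l ++ [rule]))
    = d.modify (pvTrig rule) [] (fun l => l ++ [rule]) := by
  by_cases h : d.contains (pvTrig rule) = true
  · simp [h]
  · simp only [Bool.not_eq_true] at h
    simp only [h]
    simp [PySem.Dict.modify, PySem.Dict.getD_insert_self, PySem.Dict.insert_insert_self,
      PySem.Dict.getD_of_not_contains d _ h]

theorem pvFoldA_eq (l : List (List (String × String)))
    (d : PySem.Dict String (List (List (String × String)))) :
    l.foldl (fun d rule =>
      let trigger := pvTrig rule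
      let d := if d.contains trigger then d else d.insert trigger []
      d.modify trigger [] (fun l => l ++ [rule])) d
    = l.foldl (fun d rule => d.modify (pvTrig rule) [] (fun l => l ++ [rule])) d := by
  induction l generalizing d with
  | nil => rfl
  | cons r t ih => simp only [List.foldl_cons, pvStepA_eq]

-- ===== VERDICT (by name: the statement is the Claim_ definition above) =====
theorem build_rules_by_trigger_spec : Claim_equal_build_rules_by_trigger := by
  intro rt _ _
  show build_rules_by_trigger rt = build_rules_by_trigger_alt rt
  -- A side: reduce to the modify-fold, then to keys × grouped values
  rw [build_rules_by_trigger, pvFoldA_eq]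
  set D := rt.foldl (fun d rule => d.modify (pvTrig rule) [] (fun l => l ++ [rule])) PySem.Dict.empty with hD
  have hkeys : D.keys = PySem.Set.ofList (rt.map pvTrig) := by
    rw [hD, PySem.Dict.keys_foldl_modify_key rt pvTrig [] (fun _ r => fun l => l ++ [r])]
    simp [PySem.Set.update, PySem.Set.ofList_eq_foldl, PySem.Dict.keys_empty]
  have hnd : D.keys.Nodup := by
    rw [hD]
    exact PySem.Dict.nodup_keys_foldl_modify_key rt pvTrig [] (fun _ r => fun l => l ++ [r])
      PySem.Dict.empty (by simp [PySem.Dict.keys_empty])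
  have hget : ∀ t, D.getD t [] = rt.filter (fun r => pvTrig r == t) := by
    intro t
    have hmap : D = (rt.map (fun r => (pvTrig r, r))).foldl
        (fun d p => d.modify p.1 [] (fun l => l ++ [p.2])) PySem.Dict.empty := by
      rw [hD, List.foldl_map]
    rw [hmap, PySem.Dict.getD_foldl_modify_append]
    simp [PySem.Dict.getD_empty, List.filter_map, Function.comp_def]
  -- B side: fresh distinct keys, so the insert-loop appends exactly one pair per trigger
  have hB : build_rules_by_trigger_alt rt
      = (PySem.List.dedup (rt.map pvTrig)).map
          (fun t => (t, rt.filter (fun r => pvTrig r == t))) := by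
    rw [build_rules_by_trigger_alt]
    rw [PySem.Dict.items_foldl_insert_fresh _ (fun t => t)
      (fun t => rt.filter (fun r => pvTrig r == t)) PySem.Dict.empty
      (by intro a _; simp [PySem.Dict.contains_empty])
      (by simp)]
    simp [PySem.Dict.empty]
  rw [hB, PySem.Dict.items_eq_map_keys D hnd [], hkeys, PySem.List.dedup_eq_ofList]
  exact List.map_congr_left (fun t _ => by rw [hget t])
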